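-- pv_equiv track=rewrite | github.com/kalirocket/Huricane_Analysis_Codecademy | script.py | function5
-- ===== SOURCE A (Python) =====
-- def function4(areas_affected):
--     dict1 = {}
--     areas = []
--     mixed = []
--     for i in areas_affected:
--         for area in i:
--             mixed.append(area)
--             if area not in areas:
--                 areas.append(area)
--     for area in areas:
--         dict1[area] = mixed.count(area)
--     return dict1
--
-- def function5(areas_affected):
--     dict1 = function4(areas_affected)
--     dict2 = {}
--     max_value = (max(dict1.values()),)
--     while len(max_value) > 0 and max_value[-1] in list(dict1.values()):
--           index_of_value = list(dict1.values()).index(max_value[-1])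
--           corresponding_area = list(dict1.keys())[index_of_value]
--           dict2[corresponding_area] = dict1.pop(corresponding_area)
--     return dict2
-- ===== SOURCE B (Python) =====
-- def function5(areas_affected):
--     counts = {}
--     for group in areas_affected:
--         for area in group:
--             counts[area] = counts.get(area, 0) + 1
--     m = max(counts.values())
--     return {k: v for k, v in counts.items() if v == m}
-- ===== Notes on version B (the rewrite author's own statement) =====
-- stated objective: faster
-- what changed: Replaces A's append-all-then-list.count counting (function4) and its repeated list(values()).index/keys()/pop rebuild-and-rescan while-loop by one running-count dict pass plus a single linear filter of the items at the max value.
import Mathlib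
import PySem

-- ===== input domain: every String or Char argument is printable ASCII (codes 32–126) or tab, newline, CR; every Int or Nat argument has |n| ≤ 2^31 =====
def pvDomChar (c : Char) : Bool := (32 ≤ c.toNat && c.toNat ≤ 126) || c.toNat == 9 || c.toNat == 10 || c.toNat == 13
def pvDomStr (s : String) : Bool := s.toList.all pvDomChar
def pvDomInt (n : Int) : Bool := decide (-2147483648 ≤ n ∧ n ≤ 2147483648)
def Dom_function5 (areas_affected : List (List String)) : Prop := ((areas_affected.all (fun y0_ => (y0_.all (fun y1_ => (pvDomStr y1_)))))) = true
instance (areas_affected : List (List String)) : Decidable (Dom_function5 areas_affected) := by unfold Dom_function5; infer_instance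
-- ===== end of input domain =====

-- B replaces A's build-list-then-count counting and its repeated values().index/pop rescanning loop
-- by a single-pass running-count dict plus one linear filter at the max value (objective: faster, measured).

-- ===== PORT A =====
-- function4: nested loop building `mixed` (all areas) and `areas` (ordered dedup), then dict of counts
def function4 (areas_affected : List (List String)) : PySem.Dict String Int :=
  let st : List String × List String :=
    areas_affected.foldl
      (fun st i => i.foldl
        (fun st area =>
          (st.1 ++ [area], if st.2.contains area then st.2 else st.2 ++ [area])) st)
      ([], [])
  st.2.foldl (fun d area => d.insert area ((PySem.List.count st.1 area : Nat) : Int)) PySem.Dict.empty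

-- the while loop of function5: repeatedly find the first key whose value is max_value[-1], pop it into dict2
def function5Loop (m : Int) (d1 d2 : PySem.Dict String Int) : PySem.Dict String Int :=
  if _hmem : 0 < ([m].length) ∧ m ∈ d1.values then
    match _h1 : PySem.List.index? d1.values m with
    | none => d2      -- unreachable: m ∈ values
    | some idx =>
      match _h2 : PySem.List.pyGet? d1.keys (idx : Int) with
      | none => d2    -- unreachable: idx < len(keys)
      | some key =>
        match h3 : d1.pop? key with
        | none => d2  -- unreachable: key ∈ keys
        | some (v, d1') => function5Loop m d1' (d2.insert key v)
  else d2
termination_by d1.size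
decreasing_by
  simp only [PySem.Dict.pop?, Option.map_eq_some_iff, Prod.mk.injEq] at h3
  obtain ⟨w, hw, rfl, rfl⟩ := h3
  have hk : (key, w) ∈ d1.items := PySem.Dict.mem_items_of_get?_eq_some d1 hw
  simp only [PySem.Dict.erase, PySem.Dict.size]
  exact List.length_filter_lt_length_iff_exists.mpr ⟨(key, w), hk, by simp⟩

def function5 (areas_affected : List (List String)) : List (String × Int) :=
  let dict1 := function4 areas_affected
  match PySem.List.max? dict1.values (fun v => v) with
  | none => []   -- Python raises ValueError here (max of empty); excluded by Pre_
  | some mv => (function5Loop mv dict1 PySem.Dict.empty).items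

-- ===== PORT B =====
def function5_alt (areas_affected : List (List String)) : List (String × Int) :=
  let counts := areas_affected.foldl
    (fun d group => group.foldl (fun d area => d.insert area (d.getD area 0 + 1)) d)
    PySem.Dict.empty
  match PySem.List.max? counts.values (fun v => v) with
  | none => []   -- Python raises ValueError here (max of empty); excluded by Pre_
  | some m => counts.items.filter (fun p => p.2 == m)  -- the dict comprehension: keys are distinct, so its items are this filter

-- ===== PRECONDITION & SPEC =====
-- Pre_ excludes exactly the inputs with no area at all, on which Python's max of the empty values sequence raises ValueError (in A and in B alike).
def Pre_function5 (areas_affected : List (List String)) : Prop := areas_affected.flatten ≠ []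
instance (areas_affected : List (List String)) : Decidable (Pre_function5 areas_affected) := by unfold Pre_function5; infer_instance
def pvWitness_function5 : List (List String) := [["a", "b"], ["b"]]

def Spec_function5 (areas_affected : List (List String)) (out : List (String × Int)) : Prop := out = function5_alt areas_affected
instance (areas_affected : List (List String)) (out : List (String × Int)) : Decidable (Spec_function5 areas_affected out) := by unfold Spec_function5; infer_instance

-- ===== CLAIM (what is proved, stated in full; the proofs are below) =====
def Claim_equal_function5 : Prop := ∀ (areas_affected : List (List String)), Dom_function5 areas_affected → Pre_function5 areas_affected → Spec_function5 areas_affected (function5 areas_affected)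

-- ===== LEMMAS AND PROOFS =====

-- A's nested collection loop from any start state: appends the flattened input to `mixed`
-- and updates the ordered dedup `areas`.
theorem pvInnerFold (g : List String) : ∀ (mx ar : List String),
    g.foldl (fun st area =>
        (st.1 ++ [area], if st.2.contains area then st.2 else st.2 ++ [area])) (mx, ar)
      = (mx ++ g, PySem.Set.update ar g) := by
  induction g with
  | nil => intro mx ar; simp [PySem.Set.update]
  | cons a t ih =>
    intro mx ar
    simp only [List.foldl_cons, PySem.Set.update_cons]
    rw [ih]
    simp [PySem.Set.add]

theorem pvOuterFold (L : List (List String)) : ∀ (mx ar : List String),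
    L.foldl (fun st i => i.foldl
        (fun st area =>
          (st.1 ++ [area], if st.2.contains area then st.2 else st.2 ++ [area])) st) (mx, ar)
      = (mx ++ L.flatten, PySem.Set.update ar L.flatten) := by
  induction L with
  | nil => intro mx ar; simp [PySem.Set.update]
  | cons g t ih =>
    intro mx ar
    simp only [List.foldl_cons, List.flatten_cons, PySem.Set.update_append]
    rw [pvInnerFold, ih, List.append_assoc]

theorem pvFunction4_eq_counter (areas_affected : List (List String)) :
    function4 areas_affected = PySem.Dict.counter areas_affected.flatten := by
  unfold function4
  have h := pvOuterFold areas_affected [] []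
  simp only [List.nil_append, PySem.Set.update_nil_left] at h
  rw [h]
  apply PySem.Dict.ext
  rw [PySem.Dict.items_counter]
  have hfresh : ∀ a ∈ PySem.Set.ofList areas_affected.flatten,
      (PySem.Dict.empty : PySem.Dict String Int).contains a = false := by
    intro a _; simp [pysem]
  have hnd : (List.map (fun a => a) (PySem.Set.ofList areas_affected.flatten)).Nodup := by
    simpa using PySem.Set.nodup_ofList areas_affected.flatten
  rw [PySem.Dict.items_foldl_insert_fresh (PySem.Set.ofList areas_affected.flatten)
        (fun a => a) (fun a => ((PySem.List.count areas_affected.flatten a : Nat) : Int))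
        PySem.Dict.empty hfresh hnd]
  simp [PySem.List.count_eq, PySem.Dict.empty]

-- a filter that removes nothing
theorem pvFilterNeKey (l : List (String × Int)) (key : String) (h : key ∉ l.map Prod.fst) :
    l.filter (fun p => !(p.1 == key)) = l := by
  apply List.filter_eq_self.mpr
  intro q hq
  simp only [Bool.not_eq_eq_eq_not, Bool.not_true, beq_eq_false_iff_ne, ne_eq]
  intro hqk
  exact h (List.mem_map.mpr ⟨q, hq, hqk⟩)

-- characterisation of A's pop loop: it moves exactly the max-valued items, in order
theorem pvLoopItems (m : Int) (d1 d2 : PySem.Dict String Int)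
    (hnd : d1.keys.Nodup) (hfresh : ∀ k ∈ d1.keys, d2.contains k = false) :
    (function5Loop m d1 d2).items = d2.items ++ d1.items.filter (fun p => p.2 == m) := by
  fun_induction function5Loop m d1 d2 with
  | case1 d1 d2 hmem h1 =>
    have hs := (PySem.List.index?_isSome_iff d1.values m).mpr hmem.2
    rw [h1] at hs
    simp at hs
  | case2 d1 d2 hmem idx h1 h2 =>
    obtain ⟨hk, _, _⟩ := PySem.List.getElem_of_index?_eq_some h1
    have : idx < d1.keys.length := by
      simpa [PySem.Dict.values, PySem.Dict.keys] using hk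
    rw [PySem.List.pyGet?_natCast] at h2
    simp [List.getElem?_eq_getElem this] at h2
  | case3 d1 d2 hmem idx h1 key h2 h3 =>
    -- pop? = none means get? key = none, but key = keys[idx] ∈ keys
    obtain ⟨hk, hkv, _⟩ := PySem.List.getElem_of_index?_eq_some h1
    have hkl : idx < d1.keys.length := by
      simpa [PySem.Dict.values, PySem.Dict.keys] using hk
    rw [PySem.List.pyGet?_natCast, List.getElem?_eq_getElem hkl] at h2
    injection h2 with h2'
    subst h2'
    have hkey : d1.keys[idx] ∈ d1.keys := List.getElem_mem hkl
    simp only [PySem.Dict.pop?, Option.map_eq_none_iff] at h3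
    rw [PySem.Dict.get?_eq_none_iff_not_mem_keys] at h3
    exact absurd hkey h3
  | case4 d1 d2 hmem idx h1 key h2 v d1' h3 ih =>
    -- decompose d1.items at the first max-valued entry
    obtain ⟨pre, suf, hsplit, hlen, hnotpre⟩ :=
      (PySem.List.index?_eq_some_iff d1.values m idx).mp h1
    simp only [PySem.Dict.values] at hsplit
    obtain ⟨l1, l2, hitems, hmap1, hmap2⟩ := List.map_eq_append_iff.mp hsplit
    obtain ⟨p, l2', rfl, hp2, hmap2'⟩ := List.map_eq_cons_iff.mp hmap2
    have hl1len : l1.length = idx := by rw [← hlen, ← hmap1, List.length_map]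
    -- key = p.1
    rw [PySem.List.pyGet?_natCast] at h2
    have hkeys : d1.keys = l1.map Prod.fst ++ p.1 :: l2'.map Prod.fst := by
      simp [PySem.Dict.keys, hitems]
    have hkey : key = p.1 := by
      rw [hkeys, List.getElem?_append_right (by simp [hl1len])] at h2
      simp [hl1len] at h2
      exact h2.symm
    -- nodup pieces
    rw [hkeys] at hnd
    have hp1l1 : p.1 ∉ l1.map Prod.fst := by
      intro hmem'
      exact (List.disjoint_of_nodup_append hnd) hmem' (List.mem_cons_self)
    have hp1l2 : p.1 ∉ l2'.map Prod.fst := by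
      have := (List.nodup_append.mp hnd).2.1
      simpa using (List.nodup_cons.mp this).1
    -- pop? resolves: v = p.2 and d1'.items = l1 ++ l2'
    simp only [PySem.Dict.pop?, Option.map_eq_some_iff, Prod.mk.injEq] at h3
    obtain ⟨w, hw, rfl, rfl⟩ := h3
    have hpd1 : (p.1, p.2) ∈ d1.items := by rw [hitems]; simp
    have hndkeys : d1.keys.Nodup := by rw [hkeys]; exact hnd
    have hv : w = p.2 := by
      have := PySem.Dict.get?_of_mem_items d1 hpd1 hndkeys
      rw [hkey, this] at hw; exact (Option.some.injEq ..) ▸ hw.symm ▸ rfl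
    have hd1' : (d1.erase key).items = l1 ++ l2' := by
      simp only [PySem.Dict.erase, hitems, hkey, List.filter_append, List.filter_cons]
      rw [pvFilterNeKey l1 p.1 hp1l1, pvFilterNeKey l2' p.1 hp1l2]
      simp
    -- values of l1 are all ≠ m; p.2 = m
    have hl1ne : ∀ q ∈ l1, (q.2 == m) = false := by
      intro q hq
      have : q.2 ∈ pre := by rw [← hmap1]; exact List.mem_map.mpr ⟨q, hq, rfl⟩
      simp only [beq_eq_false_iff_ne, ne_eq]
      intro h'; exact hnotpre (h' ▸ this)
    -- apply the induction hypothesis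
    have hnd' : (d1.erase key).keys.Nodup := by
      simp only [PySem.Dict.keys, hd1', List.map_append]
      exact hnd.sublist (List.Sublist.append_left (List.sublist_cons_self _ _) _)
    have hfresh' : ∀ k ∈ (d1.erase key).keys, (d2.insert key w).contains k = false := by
      intro k hkmem
      simp only [PySem.Dict.keys, hd1', List.map_append, List.mem_append] at hkmem
      have hkd1 : k ∈ d1.keys := by
        rw [hkeys]; rcases hkmem with h' | h'
        · exact List.mem_append_left _ h'
        · exact List.mem_append_right _ (List.mem_cons_of_mem _ h')
      have hkne : k ≠ key := by
        rw [hkey]; intro rfl'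
        rcases hkmem with h' | h'
        · exact hp1l1 (rfl' ▸ h')
        · exact hp1l2 (rfl' ▸ h')
      rw [PySem.Dict.contains_insert]
      simp [hkne, hfresh k hkd1]
    have ih' := ih hnd' hfresh'
    rw [ih']
    -- d2.insert key w appends (key ∉ d2)
    have hkeyd1 : key ∈ d1.keys := by rw [hkeys, hkey]; simp
    rw [PySem.Dict.items_insert_of_not_contains d2 w (hfresh key hkeyd1)]
    -- assemble both sides
    rw [hd1', hitems]
    simp only [List.filter_append, List.filter_cons]
    rw [List.filter_eq_nil_iff.mpr (by intro q hq; simp [hl1ne q hq])]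
    simp [hp2, hkey, hv, Prod.ext_iff]
  | case5 d1 d2 hmem =>
    have hnm : m ∉ d1.values := fun h' => hmem ⟨by simp, h'⟩
    have hnil : d1.items.filter (fun p => p.2 == m) = [] := by
      apply List.filter_eq_nil_iff.mpr
      intro q hq
      simp only [Bool.not_eq_true, beq_eq_false_iff_ne, ne_eq]
      intro h'
      exact hnm (h' ▸ List.mem_map.mpr ⟨q, hq, rfl⟩)
    rw [hnil, List.append_nil]

theorem pvAltCounts (areas_affected : List (List String)) :
    areas_affected.foldl
      (fun d group => group.foldl (fun d area => d.insert area (d.getD area 0 + 1)) d)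
      PySem.Dict.empty = PySem.Dict.counter areas_affected.flatten := by
  rw [← PySem.Dict.foldl_insert_getD_add_one_eq_counter, List.foldl_flatten]

-- ===== VERDICT (by name: the statement is the Claim_ definition above) =====
theorem function5_spec : Claim_equal_function5 := by
  unfold Claim_equal_function5
  intro areas_affected _ _
  unfold Spec_function5 function5 function5_alt
  simp only [pvFunction4_eq_counter, pvAltCounts]
  cases hmx : PySem.List.max? (PySem.Dict.counter areas_affected.flatten).values (fun v => v) with
  | none => rfl
  | some mv =>
    show (function5Loop mv (PySem.Dict.counter areas_affected.flatten) PySem.Dict.empty).items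
      = List.filter (fun p => p.2 == mv) (PySem.Dict.counter areas_affected.flatten).items
    rw [pvLoopItems mv (PySem.Dict.counter areas_affected.flatten) PySem.Dict.empty
          (PySem.Dict.nodup_keys_counter _) (by intro k _; simp [pysem])]
    simp [PySem.Dict.empty]
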